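-- pv_equiv track=rewrite | github.com/peeyush-tm/stc-robot-automation | bug_reporter.py | _generate_steps
-- ===== SOURCE A (Python) =====
-- def _generate_steps(test_name, keywords, env_url):
--     """Generate 5-6 numbered steps to reproduce."""
--     steps = [
--         f"   4.1 - Open the URL {env_url}",
--         f"   4.2 - Enter the correct valid details for login",
--     ]
--
--     added = set()
--     step_num = 3
--     for kw in keywords:
--         if step_num > 6:
--             break
--         skip_names = {
--             "capture test screenshot", "capture step screenshot",
--             "sleep", "set suite variable", "set test variable",
--             "log", "run keywords",
--         }
--         if kw.lower() in skip_names or kw in added: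
--             continue
--         readable = kw.replace("_", " ").strip()
--         steps.append(f"   4.{step_num} - {readable}")
--         added.add(kw)
--         step_num += 1
--
--     if step_num <= 6:
--         steps.append(
--             f"   4.{step_num} - Observe the result and verify the expected behavior"
--         )
--
--     return "\n".join(steps)
-- ===== SOURCE B (Python) =====
-- def _generate_steps(test_name, keywords, env_url):
--     """Generate 5-6 numbered steps to reproduce."""
--     skip_names = {
--         "capture test screenshot", "capture step screenshot",
--         "sleep", "set suite variable", "set test variable",
--         "log", "run keywords",
--     }
--     seen = set()
--     readables = []
--     for kw in keywords:
--         if kw.lower() in skip_names or kw in seen: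
--             continue
--         seen.add(kw)
--         readables.append(kw.replace("_", " ").strip())
--
--     lines = [
--         f"   4.1 - Open the URL {env_url}",
--         f"   4.2 - Enter the correct valid details for login",
--     ]
--     lines += [f"   4.{n} - {r}" for n, r in enumerate(readables[:4], start=3)]
--     if len(readables) < 4:
--         lines.append(
--             f"   4.{len(readables) + 3} - Observe the result and verify the expected behavior"
--         )
--     return "\n".join(lines)
-- ===== Notes on version B (the rewrite author's own statement) =====
-- stated objective: simpler
-- what changed: B separates concerns: one pass filters/dedups keywords into an ordered readable list, then slicing+enumerate produces the numbered lines and a length test decides the observe step, instead of A's single loop interleaving a step counter, break, per-iteration skip-set construction and the observe condition.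
import Mathlib
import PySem

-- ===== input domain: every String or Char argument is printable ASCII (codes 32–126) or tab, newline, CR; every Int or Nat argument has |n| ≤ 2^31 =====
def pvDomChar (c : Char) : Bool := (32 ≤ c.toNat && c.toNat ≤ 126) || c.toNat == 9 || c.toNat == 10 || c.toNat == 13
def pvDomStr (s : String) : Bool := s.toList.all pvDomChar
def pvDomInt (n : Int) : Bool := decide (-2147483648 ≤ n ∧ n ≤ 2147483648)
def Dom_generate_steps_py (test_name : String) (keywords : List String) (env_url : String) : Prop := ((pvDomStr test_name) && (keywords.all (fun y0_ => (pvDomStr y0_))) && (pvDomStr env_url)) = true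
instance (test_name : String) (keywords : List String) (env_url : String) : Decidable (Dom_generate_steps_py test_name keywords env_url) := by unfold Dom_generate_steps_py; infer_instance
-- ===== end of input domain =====

-- B separates filtering/dedup from numbering (two phases) instead of A's single counted loop; objective: simpler.

-- ===== PORT A =====
-- the skip_names set literal A builds each iteration (constant)
def skipNamesA : PySem.Set String := PySem.Set.ofList
  ["capture test screenshot", "capture step screenshot",
   "sleep", "set suite variable", "set test variable",
   "log", "run keywords"]

-- A's loop: state (steps, added, step_num); 'break' is modelled by skipping the
-- body for the rest of the list (step_num never decreases, so this is exact).
def genStepsLoopA : List String → List String → PySem.Set String → Int → (List String × Int)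
  | [], steps, _, n => (steps, n)
  | kw :: rest, steps, added, n =>
    if n > 6 then (steps, n)
    else if PySem.Set.contains skipNamesA (PySem.Str.lower kw) || PySem.Set.contains added kw then
      genStepsLoopA rest steps added n
    else
      let readable := PySem.Str.strip (PySem.Str.replace kw "_" " ")
      genStepsLoopA rest (steps ++ ["   4." ++ PySem.Int.toStr n ++ " - " ++ readable])
        (PySem.Set.add added kw) (n + 1)

def generate_steps_py (test_name : String) (keywords : List String) (env_url : String) : String :=
  let steps : List String :=
    ["   4.1 - Open the URL " ++ env_url,
     "   4.2 - Enter the correct valid details for login"]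
  let r := genStepsLoopA keywords steps PySem.Set.empty 3
  let steps := r.1
  let n := r.2
  let steps :=
    if n ≤ 6 then
      steps ++ ["   4." ++ PySem.Int.toStr n ++ " - Observe the result and verify the expected behavior"]
    else steps
  PySem.Str.join "\n" steps

-- ===== PORT B =====
def skipNamesB : PySem.Set String := PySem.Set.ofList
  ["capture test screenshot", "capture step screenshot",
   "sleep", "set suite variable", "set test variable",
   "log", "run keywords"]

-- phase 1: ordered filtered/deduped readable keywords
def readablesB : List String → PySem.Set String → List String
  | [], _ => []
  | kw :: rest, seen =>
    if PySem.Set.contains skipNamesB (PySem.Str.lower kw) || PySem.Set.contains seen kw then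
      readablesB rest seen
    else
      PySem.Str.strip (PySem.Str.replace kw "_" " ") :: readablesB rest (PySem.Set.add seen kw)

-- phase 2: enumerate(readables[:4], start=3)
def numberFrom : Int → List String → List String
  | _, [] => []
  | n, r :: rs => ("   4." ++ PySem.Int.toStr n ++ " - " ++ r) :: numberFrom (n + 1) rs

def generate_steps_py_alt (test_name : String) (keywords : List String) (env_url : String) : String :=
  let readables := readablesB keywords PySem.Set.empty
  let lines : List String :=
    ["   4.1 - Open the URL " ++ env_url,
     "   4.2 - Enter the correct valid details for login"]
    ++ numberFrom 3 (readables.take 4)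
    ++ (if readables.length < 4 then
          ["   4." ++ PySem.Int.toStr ((readables.length : Int) + 3) ++ " - Observe the result and verify the expected behavior"]
        else [])
  PySem.Str.join "\n" lines

-- ===== PRECONDITION & SPEC =====
def Spec_generate_steps_py (test_name : String) (keywords : List String) (env_url : String) (out : String) : Prop := out = generate_steps_py_alt test_name keywords env_url
instance (test_name : String) (keywords : List String) (env_url : String) (out : String) : Decidable (Spec_generate_steps_py test_name keywords env_url out) := by unfold Spec_generate_steps_py; infer_instance

-- ===== CLAIM (what is proved, stated in full; the proofs are below) =====
def Claim_equal_generate_steps_py : Prop := ∀ (test_name : String) (keywords : List String) (env_url : String), Dom_generate_steps_py test_name keywords env_url → Spec_generate_steps_py test_name keywords env_url (generate_steps_py test_name keywords env_url)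

-- ===== LEMMAS AND PROOFS =====

theorem skipNames_eq : skipNamesA = skipNamesB := rfl

-- loop invariant: A's loop from (steps, added, n) appends the numbered first
-- (7-n) readables still to come and advances n by how many it appended
theorem loopA_eq (kws : List String) : ∀ (steps : List String) (added : PySem.Set String) (n : Int),
    3 ≤ n → n ≤ 7 →
    genStepsLoopA kws steps added n =
      (steps ++ numberFrom n ((readablesB kws added).take (7 - n).toNat),
       n + min ((readablesB kws added).length) (7 - n).toNat) := by
  induction kws with
  | nil =>
    intro steps added n _ _
    simp [genStepsLoopA, readablesB, numberFrom]
  | cons kw rest ih =>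
    intro steps added n h3 h7
    by_cases hbr : n > 6
    · have hn : n = 7 := by omega
      subst hn
      simp [genStepsLoopA, numberFrom]
    · have hskipB : ∀ (b : Bool),
        (PySem.Set.contains skipNamesA (PySem.Str.lower kw) || PySem.Set.contains added kw) = b →
        (PySem.Set.contains skipNamesB (PySem.Str.lower kw) || PySem.Set.contains added kw) = b := by
        intro b hb; rw [← skipNames_eq]; exact hb
      by_cases hskip : (PySem.Set.contains skipNamesA (PySem.Str.lower kw) || PySem.Set.contains added kw) = true
      · rw [genStepsLoopA, if_neg hbr, if_pos hskip, readablesB, if_pos (hskipB true hskip)]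
        exact ih steps added n h3 h7
      · have hskip' := eq_false_of_ne_true hskip
        have htk : (7 - n).toNat = (6 - n).toNat + 1 := by omega
        rw [genStepsLoopA, if_neg hbr, if_neg hskip, readablesB, if_neg (by rw [hskipB false hskip']; simp)]
        rw [ih _ _ _ (by omega) (by omega)]
        have h76 : (7 - (n + 1)).toNat = (6 - n).toNat := by omega
        simp only [htk, h76, List.take_succ_cons, numberFrom, List.length_cons,
          Nat.succ_min_succ, List.append_assoc, List.cons_append,
          Prod.mk.injEq]
        constructor
        · rfl
        · push_cast
          ring

theorem generate_steps_py_spec : Claim_equal_generate_steps_py := by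
  intro test_name keywords env_url _
  unfold Spec_generate_steps_py generate_steps_py generate_steps_py_alt
  simp only [loopA_eq keywords _ PySem.Set.empty 3 (by omega) (by omega)]
  have h4 : ((7 : Int) - 3).toNat = 4 := by decide
  rw [h4]
  set L := readablesB keywords PySem.Set.empty with hL
  by_cases hlen : L.length < 4
  · have hmin : min L.length 4 = L.length := by omega
    rw [hmin]
    rw [if_pos (by omega)]
    have : (3 : Int) + L.length = (L.length : Int) + 3 := by omega
    rw [this, List.append_assoc, if_pos hlen]
    rw [List.append_assoc]
  · have hmin : min L.length 4 = 4 := by omega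
    rw [hmin]
    rw [if_neg (by omega)]
    rw [if_neg hlen]
    simp
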